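-- pv_equiv track=rewrite | github.com/lucky-patel-7/new_rp | src/resume_parser/utils/roles_config.py | find_seniority_mapping
-- ===== SOURCE A (Python) =====
-- from typing import Dict, List, Optional, Any, Set
--
-- def find_seniority_mapping(query: str) -> Optional[str]:
--     """Find seniority level mapping for query."""
--     query_lower = query.lower()
--
--     seniority_mappings = {
--         "junior": ["junior", "jr", "entry level", "entry-level", "fresher", "graduate", "associate"],
--         "mid": ["mid", "middle", "intermediate"],
--         "senior": ["senior", "sr", "experienced", "lead"],
--         "manager": ["manager", "team lead", "supervisor", "mgr"],
--         "director": ["director", "head of", "vp", "vice president", "chief"]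
--     }
--
--     for seniority, terms in seniority_mappings.items():
--         if any(term in query_lower for term in terms):
--             return seniority
--
--     return None
-- ===== SOURCE B (Python) =====
-- # Inverted approach: instead of scanning the keyword lists against the query, scan the
-- # query's substrings (every window of length 2..14) against a hash map term->group rank
-- # built once, keeping the smallest rank seen; the smallest rank is exactly the first
-- # group A's ordered scan would hit.
-- _LEVELS = ("junior", "mid", "senior", "manager", "director")
--
-- _TERM_RANK = {
--     term: rank
--     for rank, terms in enumerate([
--         ["junior", "jr", "entry level", "entry-level", "fresher", "graduate", "associate"],
--         ["mid", "middle", "intermediate"],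
--         ["senior", "sr", "experienced", "lead"],
--         ["manager", "team lead", "supervisor", "mgr"],
--         ["director", "head of", "vp", "vice president", "chief"],
--     ])
--     for term in terms
-- }
--
-- _MAX_LEN = max(map(len, _TERM_RANK))  # 14
--
--
-- def find_seniority_mapping(query):
--     q = query.lower()
--     n = len(q)
--     best = None
--     for i in range(n):
--         for j in range(i + 2, min(i + _MAX_LEN, n) + 1):
--             r = _TERM_RANK.get(q[i:j])
--             if r is not None and (best is None or r < best):
--                 best = r
--     return None if best is None else _LEVELS[best]
-- ===== Notes on version B (the rewrite author's own statement) =====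
-- stated objective: alternative
-- what changed: Inverts the search: instead of scanning each keyword list against the query per group, B enumerates the query's substrings of length 2..14 and looks each up in a term->rank hash map built once, returning the level of the minimum rank found, which equals A's first-matching-group answer.
import Mathlib
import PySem

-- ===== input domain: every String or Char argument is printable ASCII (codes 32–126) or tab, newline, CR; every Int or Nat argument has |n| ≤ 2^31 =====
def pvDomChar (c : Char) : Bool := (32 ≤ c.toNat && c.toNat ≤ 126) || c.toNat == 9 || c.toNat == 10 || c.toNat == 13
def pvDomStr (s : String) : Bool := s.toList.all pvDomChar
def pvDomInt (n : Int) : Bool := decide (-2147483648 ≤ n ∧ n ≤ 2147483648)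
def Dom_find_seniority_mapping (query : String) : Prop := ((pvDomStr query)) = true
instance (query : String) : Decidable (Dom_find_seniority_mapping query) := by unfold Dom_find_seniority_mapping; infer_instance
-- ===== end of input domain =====

-- B inverts A's search: instead of scanning the keyword lists per group, B slides over the
-- query's substrings of length 2..14 and looks each up in a term->rank map, keeping the
-- minimum rank, which equals A's first-matching-group answer (objective: alternative).

-- ===== PORT A =====
-- the dict literal of A, as an insertion-ordered association list
def pvGroupsA : List (String × List String) :=
  [("junior", ["junior", "jr", "entry level", "entry-level", "fresher", "graduate", "associate"]),
   ("mid", ["mid", "middle", "intermediate"]),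
   ("senior", ["senior", "sr", "experienced", "lead"]),
   ("manager", ["manager", "team lead", "supervisor", "mgr"]),
   ("director", ["director", "head of", "vp", "vice president", "chief"])]

-- A: for each (seniority, terms) in dict order, return seniority if any term is a substring
def find_seniority_mapping (query : String) : Option String :=
  let query_lower := PySem.Str.lower query
  pvGroupsA.findSome? (fun g =>
    if g.2.any (fun term => PySem.Str.isIn term query_lower) then some g.1 else none)

-- ===== PORT B =====
def pvLevels : List String := ["junior", "mid", "senior", "manager", "director"]

-- B's module-level {term: rank} dict (the dict comprehension, written out)
def pvTermRank : PySem.Dict String Int :=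
  PySem.Dict.mk
    [("junior", 0), ("jr", 0), ("entry level", 0), ("entry-level", 0), ("fresher", 0),
     ("graduate", 0), ("associate", 0),
     ("mid", 1), ("middle", 1), ("intermediate", 1),
     ("senior", 2), ("sr", 2), ("experienced", 2), ("lead", 2),
     ("manager", 3), ("team lead", 3), ("supervisor", 3), ("mgr", 3),
     ("director", 4), ("head of", 4), ("vp", 4), ("vice president", 4), ("chief", 4)]

def pvMaxLen : Int := 14   -- max(map(len, _TERM_RANK))

-- B: scan every window q[i:j] of length 2..14, dict lookup, keep the smallest rank
def find_seniority_mapping_alt (query : String) : Option String :=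
  let q := PySem.Str.lower query
  let n : Int := (PySem.Str.len q : Int)
  let best : Option Int :=
    (PySem.List.pyRange 0 n 1).foldl (fun best i =>
      (PySem.List.pyRange (i + 2) (min (i + pvMaxLen) n + 1) 1).foldl (fun best j =>
        match PySem.Dict.get? pvTermRank (PySem.Str.slice q (some i) (some j)) with
        | some r => match best with
                    | none => some r
                    | some b => if r < b then some r else best
        | none => best) best) none
  match best with
  | none => none
  | some b => PySem.List.pyGet? pvLevels b

-- ===== PRECONDITION & SPEC =====
def Spec_find_seniority_mapping (query : String) (out : Option String) : Prop := out = find_seniority_mapping_alt query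
instance (query : String) (out : Option String) : Decidable (Spec_find_seniority_mapping query out) := by unfold Spec_find_seniority_mapping; infer_instance

-- ===== CLAIM (what is proved, stated in full; the proofs are below) =====
def Claim_equal_find_seniority_mapping : Prop := ∀ (query : String), Dom_find_seniority_mapping query → Spec_find_seniority_mapping query (find_seniority_mapping query)

-- ===== LEMMAS AND PROOFS =====

-- B's running "best" update, as a binary step
def pvStep (b : Option Int) (r : Int) : Option Int :=
  match b with
  | none => some r
  | some x => if r < x then some r else b

-- the ranks B's inner loop finds at window start i
def pvInner (q : String) (n i : Int) : List Int :=
  (PySem.List.pyRange (i + 2) (min (i + pvMaxLen) n + 1) 1).filterMap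
    (fun j => PySem.Dict.get? pvTermRank (PySem.Str.slice q (some i) (some j)))

-- all ranks B's double loop finds
def pvFound (q : String) : List Int :=
  (PySem.List.pyRange 0 ((PySem.Str.len q : Int)) 1).flatMap (pvInner q ((PySem.Str.len q : Int)))

-- A's groups with their numeric ranks
def pvRanked : List (Int × List String) :=
  [(0, ["junior", "jr", "entry level", "entry-level", "fresher", "graduate", "associate"]),
   (1, ["mid", "middle", "intermediate"]),
   (2, ["senior", "sr", "experienced", "lead"]),
   (3, ["manager", "team lead", "supervisor", "mgr"]),
   (4, ["director", "head of", "vp", "vice president", "chief"])]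

-- ranks of the groups with a matching term, one copy per matching term, in group order
def pvBlocks (q : String) : List Int :=
  pvRanked.flatMap (fun g => (g.2.filter (fun t => PySem.Str.isIn t q)).map (fun _ => g.1))

theorem pv_nodup_keys : pvTermRank.keys.Nodup := by decide

theorem pv_mem_items_iff (t : String) (r : Int) :
    (t, r) ∈ pvTermRank.items ↔ ∃ g ∈ pvRanked, r = g.1 ∧ t ∈ g.2 := by
  constructor
  · intro h; fin_cases h <;> decide
  · rintro ⟨g, hg, rfl, ht⟩; fin_cases hg <;> (fin_cases ht <;> decide)

theorem pv_term_len (g : Int × List String) (t : String) (hg : g ∈ pvRanked) (ht : t ∈ g.2) :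
    2 ≤ t.toList.length ∧ t.toList.length ≤ 14 := by
  fin_cases hg <;> (fin_cases ht <;> decide)

-- the inner fold is a fold of pvStep over the looked-up ranks
theorem pv_foldl_lookup (L : List Int) (f : Int → Option Int) (b : Option Int) :
    L.foldl (fun best j =>
      match f j with
      | some r => match best with
                  | none => some r
                  | some x => if r < x then some r else best
      | none => best) b
    = (L.filterMap f).foldl pvStep b := by
  induction L generalizing b with
  | nil => rfl
  | cons j L ih =>
      simp only [List.foldl_cons, List.filterMap_cons]
      cases f j with
      | none => exact ih b
      | some r => simp only [List.foldl_cons]; exact ih (pvStep b r)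

-- folding pvStep from none computes the minimum
theorem pv_foldl_step_some (xs : List Int) (a : Int) :
    xs.foldl pvStep (some a) = some (xs.foldl min a) := by
  induction xs generalizing a with
  | nil => rfl
  | cons r xs ih =>
      simp only [List.foldl_cons]
      have : pvStep (some a) r = some (min a r) := by
        simp only [pvStep]; split <;> (congr 1; omega)
      rw [this, ih]

theorem pv_foldl_step_none (xs : List Int) : xs.foldl pvStep none = xs.min? := by
  cases xs with
  | nil => rfl
  | cons a xs => simpa [List.min?, pvStep] using pv_foldl_step_some xs a

-- lists with the same members have the same minimum
theorem pv_min?_congr (xs ys : List Int) (h : ∀ a, a ∈ xs ↔ a ∈ ys) : xs.min? = ys.min? := by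
  cases hx : xs.min? with
  | none =>
      rw [List.min?_eq_none_iff] at hx
      symm; rw [List.min?_eq_none_iff]
      cases hy : ys with
      | nil => rfl
      | cons b ys' => exact absurd ((h b).mpr (by simp [hy])) (by simp [hx])
  | some a =>
      rw [List.min?_eq_some_iff] at hx
      symm; rw [List.min?_eq_some_iff]
      exact ⟨(h a).mp hx.1, fun b hb => hx.2 b ((h b).mpr hb)⟩

-- what B finds = the ranks of groups with a matching term (as sets)
theorem pv_found_mem_iff (query : String) (r : Int) :
    r ∈ pvFound query ↔ r ∈ pvBlocks query := by
  constructor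
  · intro h
    simp only [pvFound, pvInner, List.mem_flatMap, List.mem_filterMap] at h
    obtain ⟨i, hi, j, hj, hget⟩ := h
    rw [PySem.List.mem_pyRange_one] at hi hj
    have h0i : 0 ≤ i := hi.1
    have h0j : 0 ≤ j := by omega
    rw [PySem.Dict.get?_eq_some_iff_mem_items pvTermRank _ _ pv_nodup_keys,
        pv_mem_items_iff] at hget
    obtain ⟨g, hg, rfl, ht⟩ := hget
    simp only [pvBlocks, List.mem_flatMap, List.mem_map, List.mem_filter]
    refine ⟨g, hg, _, ⟨ht, ?_⟩, rfl⟩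
    rw [PySem.Str.isIn_iff_infix, PySem.Str.toList_slice, PySem.Chars.slice_eq_listSlice,
        PySem.List.slice_toNat _ h0i h0j]
    exact (List.take_prefix _ _).isInfix.trans (List.drop_suffix _ _).isInfix
  · intro h
    simp only [pvBlocks, List.mem_flatMap, List.mem_map, List.mem_filter] at h
    obtain ⟨g, hg, t, ⟨ht, hin⟩, rfl⟩ := h
    obtain ⟨hlen2, hlen14⟩ := pv_term_len g t hg ht
    have hinf : t.toList <:+: query.toList := (PySem.Str.isIn_iff_infix t query).mp hin
    obtain ⟨k, hpre⟩ :=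
      (PySem.Chars.exists_prefix_drop_iff_isIn t.toList query.toList).mpr
        ((PySem.Chars.isIn_iff_infix t.toList query.toList).mpr hinf)
    have hdl := hpre.length_le
    rw [List.length_drop] at hdl
    have hkn : k + t.toList.length ≤ query.toList.length := by omega
    have hn : (PySem.Str.len query : Int) = (query.toList.length : Int) := by
      simp [pysem]
    have hslice : PySem.Str.slice query (some (k : Int)) (some ((k + t.toList.length : Nat) : Int)) = t := by
      have h1 : (PySem.Str.slice query (some (k : Int)) (some ((k + t.toList.length : Nat) : Int))).toList = t.toList := by
        rw [PySem.Str.toList_slice, PySem.Chars.slice_eq_listSlice,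
            PySem.List.slice_toNat _ (by positivity) (by positivity)]
        simp only [Int.toNat_natCast]
        have hk : k + t.toList.length - k = t.toList.length := by omega
        rw [hk, ← List.prefix_iff_eq_take.mp hpre]
      have h2 := congrArg String.ofList h1
      simpa using h2
    simp only [pvFound, pvInner, List.mem_flatMap, List.mem_filterMap,
      PySem.List.mem_pyRange_one, hn]
    refine ⟨(k : Int), ⟨by positivity, by omega⟩,
            ((k + t.toList.length : Nat) : Int), ⟨by push_cast; omega, ?_⟩, ?_⟩
    · simp only [pvMaxLen]; push_cast; omega
    · rw [hslice, PySem.Dict.get?_eq_some_iff_mem_items pvTermRank _ _ pv_nodup_keys,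
          pv_mem_items_iff]
      exact ⟨g, hg, rfl, ht⟩

-- minimum of the blocks = first group with a match (generic, ranks strictly increasing)
theorem pv_min?_blocks (q : String) (gs : List (Int × List String))
    (hp : gs.Pairwise (fun a b => a.1 < b.1)) :
    (gs.flatMap (fun g => (g.2.filter (fun t => PySem.Str.isIn t q)).map (fun _ => g.1))).min?
      = gs.findSome? (fun g => if g.2.any (fun t => PySem.Str.isIn t q) then some g.1 else none) := by
  induction gs with
  | nil => rfl
  | cons g gs ih =>
      rw [List.pairwise_cons] at hp
      obtain ⟨hlt, hp'⟩ := hp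
      by_cases h : g.2.any (fun t => PySem.Str.isIn t q) = true
      · simp only [List.flatMap_cons, List.findSome?_cons, h, if_true]
        rw [List.min?_eq_some_iff]
        constructor
        · obtain ⟨t, ht, hin⟩ := List.any_eq_true.mp h
          exact List.mem_append_left _ (List.mem_map.mpr ⟨t, List.mem_filter.mpr ⟨ht, hin⟩, rfl⟩)
        · intro b hb
          rcases List.mem_append.mp hb with hb | hb
          · obtain ⟨t, _, rfl⟩ := List.mem_map.mp hb
            exact le_refl _
          · obtain ⟨g', hg', hb'⟩ := List.mem_flatMap.mp hb
            obtain ⟨t, _, rfl⟩ := List.mem_map.mp hb'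
            exact le_of_lt (hlt g' hg')
      · have hfil : g.2.filter (fun t => PySem.Str.isIn t q) = [] := by
          rw [List.filter_eq_nil_iff]
          intro t ht
          rw [Bool.not_eq_true, List.any_eq_false] at h
          exact h t ht
        simp only [List.flatMap_cons, hfil, List.map_nil, List.nil_append,
          List.findSome?_cons, h]
        exact ih hp'

-- the inner loop of B's port, named (specialisation of pv_foldl_lookup)
theorem pv_inner_foldl (q : String) (n i : Int) (b : Option Int) :
    (PySem.List.pyRange (i + 2) (min (i + pvMaxLen) n + 1) 1).foldl (fun best j =>
      match PySem.Dict.get? pvTermRank (PySem.Str.slice q (some i) (some j)) with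
      | some r => match best with
                  | none => some r
                  | some x => if r < x then some r else best
      | none => best) b = (pvInner q n i).foldl pvStep b :=
  pv_foldl_lookup _ _ b

-- B computes the minimum rank found, then maps it through the level table
theorem pv_alt_eq (query : String) :
    find_seniority_mapping_alt query
      = match (pvFound (PySem.Str.lower query)).min? with
        | none => none
        | some b => PySem.List.pyGet? pvLevels b := by
  simp only [find_seniority_mapping_alt, pv_inner_foldl]
  rw [show ((PySem.List.pyRange 0 ((PySem.Str.len (PySem.Str.lower query) : Int)) 1).foldl
        (fun best i => (pvInner (PySem.Str.lower query) ((PySem.Str.len (PySem.Str.lower query) : Int)) i).foldl pvStep best) none)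
      = (pvFound (PySem.Str.lower query)).foldl pvStep none from (List.foldl_flatMap).symm]
  rw [pv_foldl_step_none]

-- A's named scan = ranked scan mapped through the level table
theorem pv_named_eq_ranked (q : String) :
    pvGroupsA.findSome? (fun g => if g.2.any (fun term => PySem.Str.isIn term q) then some g.1 else none)
      = match pvRanked.findSome? (fun g => if g.2.any (fun t => PySem.Str.isIn t q) then some g.1 else none) with
        | none => none
        | some b => PySem.List.pyGet? pvLevels b := by
  simp only [pvGroupsA, pvRanked, List.findSome?_cons, List.findSome?_nil]
  cases _h0 : (["junior", "jr", "entry level", "entry-level", "fresher", "graduate", "associate"] : List String).any (fun t => PySem.Str.isIn t q) <;>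
  cases _h1 : (["mid", "middle", "intermediate"] : List String).any (fun t => PySem.Str.isIn t q) <;>
  cases _h2 : (["senior", "sr", "experienced", "lead"] : List String).any (fun t => PySem.Str.isIn t q) <;>
  cases _h3 : (["manager", "team lead", "supervisor", "mgr"] : List String).any (fun t => PySem.Str.isIn t q) <;>
  cases _h4 : (["director", "head of", "vp", "vice president", "chief"] : List String).any (fun t => PySem.Str.isIn t q) <;>
  decide

-- ===== VERDICT (by name: the statement is the Claim_ definition above) =====
theorem find_seniority_mapping_spec : Claim_equal_find_seniority_mapping := by
  intro query _
  unfold Spec_find_seniority_mapping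
  rw [pv_alt_eq,
      pv_min?_congr _ _ (pv_found_mem_iff (PySem.Str.lower query))]
  unfold pvBlocks
  rw [pv_min?_blocks _ _ (by decide)]
  simp only [find_seniority_mapping]
  exact pv_named_eq_ranked (PySem.Str.lower query)
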